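-- pv_equiv track=rewrite | github.com/jf-jeffin/seqlog | seqequ.py | dnaresolution
-- ===== SOURCE A (Python) =====
-- def dnaresolution(seq: str):
--     seq=seq.lower()
--     j={"a":"","c":"","g":"","t":""}
--     for r in seq:
--         for a in j.keys():
--                 if a!=r:
--                     j[a]=j[a]+"_"
--                 else:
--                     j[a]=j[a]+ r
--     return j
-- ===== SOURCE B (Python) =====
-- def dnaresolution(seq: str):
--     s = seq.lower()
--     pos = {}
--     for i, c in enumerate(s):
--         pos.setdefault(c, []).append(i)
--     out = {}
--     for b in "acgt":
--         mask = ["_"] * len(s)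
--         for i in pos.get(b, []):
--             mask[i] = b
--         out[b] = "".join(mask)
--     return out
-- ===== Notes on version B (the rewrite author's own statement) =====
-- stated objective: faster
-- what changed: B builds an inverted index (one pass grouping positions by character into a dict), then constructs each masked string by patching a pre-filled '_' buffer only at that base's stored positions, instead of A's per-character loop that appends to all four strings at every position.
import Mathlib
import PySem

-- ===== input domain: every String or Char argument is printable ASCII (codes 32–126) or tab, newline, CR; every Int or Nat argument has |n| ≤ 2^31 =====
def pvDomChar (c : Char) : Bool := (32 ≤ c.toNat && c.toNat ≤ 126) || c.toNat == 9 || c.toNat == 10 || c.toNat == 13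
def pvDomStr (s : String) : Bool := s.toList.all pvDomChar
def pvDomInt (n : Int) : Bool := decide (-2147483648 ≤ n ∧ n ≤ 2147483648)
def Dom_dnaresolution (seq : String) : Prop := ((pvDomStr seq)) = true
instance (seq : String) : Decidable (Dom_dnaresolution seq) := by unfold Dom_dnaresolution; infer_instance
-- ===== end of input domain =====

-- B replaces A's per-character loop (appending to all four strings at every position) by an
-- inverted index: one pass grouping positions by character, then each masked string is built
-- by patching a '_'-filled buffer only at that base's positions.

-- ===== PORT A =====
def dnaresolution (seq : String) : List (String × String) :=
  let s := PySem.Str.lower seq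
  let j0 : PySem.Dict String String :=
    PySem.Dict.ofList [("a", ""), ("c", ""), ("g", ""), ("t", "")]
  let j := s.toList.foldl (fun j r =>
    j.keys.foldl (fun j a =>
      if a != String.ofList [r] then j.insert a (j.getD a "" ++ "_")
      else j.insert a (j.getD a "" ++ String.ofList [r])) j) j0
  j.items

-- ===== PORT B =====
def dnaresolution_alt (seq : String) : List (String × String) :=
  let s := PySem.Str.lower seq
  let l := s.toList
  -- pos = {}; for i, c in enumerate(s): pos.setdefault(c, []).append(i)
  let pos : PySem.Dict Char (List Int) :=
    (PySem.List.enumerate l 0).foldl (fun d p => d.modify p.2 [] (· ++ [p.1])) PySem.Dict.empty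
  -- for b in "acgt": mask = ['_'] * len(s); for i in pos.get(b, []): mask[i] = b; out[b] = ''.join(mask)
  ['a', 'c', 'g', 't'].map (fun b =>
    let mask := (pos.getD b []).foldl (fun m i => PySem.List.pySetD m i b)
      (List.replicate l.length '_')
    (String.ofList [b], String.ofList mask))

-- ===== PRECONDITION & SPEC =====
def Spec_dnaresolution (seq : String) (out : List (String × String)) : Prop := out = dnaresolution_alt seq
instance (seq : String) (out : List (String × String)) : Decidable (Spec_dnaresolution seq out) := by unfold Spec_dnaresolution; infer_instance

-- ===== CLAIM (what is proved, stated in full; the proofs are below) =====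
def Claim_equal_dnaresolution : Prop := ∀ (seq : String), Dom_dnaresolution seq → Spec_dnaresolution seq (dnaresolution seq)

-- ===== LEMMAS AND PROOFS =====

-- the mask of one character for base b
def pvMask (b r : Char) : Char := if r == b then r else '_'

-- A's loop body applied to a dict in the canonical four-entry shape
theorem pv_step (r : Char) (sa sc sg st : List Char) :
    ((PySem.Dict.mk [("a", String.ofList sa), ("c", String.ofList sc), ("g", String.ofList sg), ("t", String.ofList st)] : PySem.Dict String String).keys.foldl (fun j a =>
      if a != String.ofList [r] then j.insert a (j.getD a "" ++ "_")
      else j.insert a (j.getD a "" ++ String.ofList [r]))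
      (PySem.Dict.mk [("a", String.ofList sa), ("c", String.ofList sc), ("g", String.ofList sg), ("t", String.ofList st)]))
    = PySem.Dict.mk [("a", String.ofList (sa ++ [pvMask 'a' r])), ("c", String.ofList (sc ++ [pvMask 'c' r])),
        ("g", String.ofList (sg ++ [pvMask 'g' r])), ("t", String.ofList (st ++ [pvMask 't' r]))] := by
  have key : ∀ b : Char, ((String.ofList [b]) == String.ofList [r]) = (b == r) := fun b => by
    by_cases h : b = r <;> simp [h, String.ext_iff]
  simp only [PySem.Dict.keys_mk, List.map, List.foldl,
    show (("a":String) != String.ofList [r]) = !('a' == r) from by rw [bne, show ("a":String) = String.ofList ['a'] from rfl, key],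
    show (("c":String) != String.ofList [r]) = !('c' == r) from by rw [bne, show ("c":String) = String.ofList ['c'] from rfl, key],
    show (("g":String) != String.ofList [r]) = !('g' == r) from by rw [bne, show ("g":String) = String.ofList ['g'] from rfl, key],
    show (("t":String) != String.ofList [r]) = !('t' == r) from by rw [bne, show ("t":String) = String.ofList ['t'] from rfl, key]]
  by_cases h1 : 'a' = r
  · subst h1
    simp [PySem.Dict.insert, PySem.Dict.getD, PySem.Dict.get?, PySem.Dict.contains, pvMask]
  · by_cases h2 : 'c' = r
    · subst h2
      simp [PySem.Dict.insert, PySem.Dict.getD, PySem.Dict.get?, PySem.Dict.contains, pvMask]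
    · by_cases h3 : 'g' = r
      · subst h3
        simp [PySem.Dict.insert, PySem.Dict.getD, PySem.Dict.get?, PySem.Dict.contains, pvMask]
      · by_cases h4 : 't' = r
        · subst h4
          simp [PySem.Dict.insert, PySem.Dict.getD, PySem.Dict.get?, PySem.Dict.contains, pvMask]
        · simp only [show ('a' == r) = false from by simp [h1],
            show ('c' == r) = false from by simp [h2],
            show ('g' == r) = false from by simp [h3],
            show ('t' == r) = false from by simp [h4], Bool.not_false]
          simp [PySem.Dict.insert, PySem.Dict.getD, PySem.Dict.get?, PySem.Dict.contains, pvMask,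
            Ne.symm h1, Ne.symm h2, Ne.symm h3, Ne.symm h4]

theorem pv_loop (l : List Char) (sa sc sg st : List Char) :
    (l.foldl (fun j r =>
      j.keys.foldl (fun j a =>
        if a != String.ofList [r] then j.insert a (j.getD a "" ++ "_")
        else j.insert a (j.getD a "" ++ String.ofList [r])) j)
      (PySem.Dict.mk [("a", String.ofList sa), ("c", String.ofList sc), ("g", String.ofList sg), ("t", String.ofList st)]))
    = PySem.Dict.mk [("a", String.ofList (sa ++ l.map (pvMask 'a'))), ("c", String.ofList (sc ++ l.map (pvMask 'c'))),
        ("g", String.ofList (sg ++ l.map (pvMask 'g'))), ("t", String.ofList (st ++ l.map (pvMask 't')))] := by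
  induction l generalizing sa sc sg st with
  | nil => simp
  | cons r tl ih =>
      rw [List.foldl_cons, pv_step, ih]
      simp

-- B's positions of base b in l
def pvPos (b : Char) (l : List Char) : List Int :=
  ((PySem.List.enumerate l 0).filter (fun p => p.2 == b)).map (·.1)

-- the inverted index returns exactly the positions of b
theorem pv_pos_spec (b : Char) (l : List Char) :
    ((PySem.List.enumerate l 0).foldl (fun d p => d.modify p.2 [] (· ++ [p.1]))
      (PySem.Dict.empty : PySem.Dict Char (List Int))).getD b [] = pvPos b l := by
  have h : (PySem.List.enumerate l 0).foldl (fun d p => d.modify p.2 [] (· ++ [p.1]))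
      (PySem.Dict.empty : PySem.Dict Char (List Int))
      = ((PySem.List.enumerate l 0).map Prod.swap).foldl
          (fun d q => d.modify q.1 [] (· ++ [q.2])) PySem.Dict.empty := by
    rw [List.foldl_map]
    rfl
  rw [h, PySem.Dict.getD_foldl_modify_append, PySem.Dict.getD_empty, List.filter_map,
    List.map_map, pvPos]
  congr 1

-- every position lies in [0, len l)
theorem pv_pos_bound (b : Char) (l : List Char) :
    ∀ i ∈ pvPos b l, 0 ≤ i ∧ i < (l.length : Int) := by
  intro i hi
  unfold pvPos at hi
  obtain ⟨p, hp, rfl⟩ := List.mem_map.mp hi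
  have hp' := List.mem_filter.mp hp
  obtain ⟨k, hk, rfl⟩ := (PySem.List.mem_enumerate_iff _ _ _).mp hp'.1
  constructor <;> simp <;> omega

-- setting only in-range positions does not touch an appended tail
theorem pv_fold_set_append (b : Char) (idxs : List Int) (m t : List Char)
    (hall : ∀ i ∈ idxs, 0 ≤ i ∧ i < (m.length : Int)) :
    idxs.foldl (fun m i => PySem.List.pySetD m i b) (m ++ t)
      = idxs.foldl (fun m i => PySem.List.pySetD m i b) m ++ t := by
  induction idxs generalizing m with
  | nil => rfl
  | cons i tl ih =>
      have hb := hall i (by simp)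
      have hset : PySem.List.pySetD (m ++ t) i b = PySem.List.pySetD m i b ++ t := by
        rw [PySem.List.pySetD_of_nonneg _ _ hb.1, PySem.List.pySetD_of_nonneg _ _ hb.1,
          List.set_append]
        have : i.toNat < m.length := by omega
        simp [this]
      rw [List.foldl_cons, List.foldl_cons, hset, ih]
      intro j hj
      have := hall j (by simp [hj])
      simpa [PySem.List.length_pySetD] using this

-- setting at the very end replaces the appended element
theorem pv_set_last (X : List Char) (a v : Char) :
    (X ++ [a]).set X.length v = X ++ [v] := by
  induction X with
  | nil => rfl
  | cons x xs ih => simp [ih]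

-- B's patching of the '_' buffer yields exactly the masked string
theorem pv_patch (b : Char) (l : List Char) :
    (pvPos b l).foldl (fun m i => PySem.List.pySetD m i b) (List.replicate l.length '_')
      = l.map (pvMask b) := by
  induction l using List.reverseRecOn with
  | nil => rfl
  | append_singleton xs c ih =>
      have hpos : pvPos b (xs ++ [c])
          = pvPos b xs ++ (if c == b then [(xs.length : Int)] else []) := by
        unfold pvPos
        rw [PySem.List.enumerate_append, List.filter_append, List.map_append]
        congr 1
        by_cases h : c = b <;> simp [PySem.List.enumerate_cons, PySem.List.enumerate_nil, h]
      have hrep : List.replicate (xs ++ [c]).length '_'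
          = List.replicate xs.length '_' ++ ['_'] := by
        simp [List.replicate_succ']
      rw [hpos, hrep, List.foldl_append,
        pv_fold_set_append b _ _ _ (by simpa using pv_pos_bound b xs), ih]
      by_cases h : c = b
      · have hlen : (List.map (pvMask b) xs).length = xs.length := by simp
        simp only [h, beq_self_eq_true, if_pos, List.foldl_cons, List.foldl_nil,
          PySem.List.pySetD_natCast]
        rw [← hlen, pv_set_last]
        simp [pvMask]
      · simp [h, pvMask, List.map_append]

-- ===== VERDICT (by name: the statement is the Claim_ definition above) =====
theorem dnaresolution_spec : Claim_equal_dnaresolution := by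
  intro seq _
  unfold Spec_dnaresolution dnaresolution dnaresolution_alt
  have h := pv_loop (PySem.Str.lower seq).toList [] [] [] []
  simp only [List.nil_append] at h
  simp only [show (PySem.Dict.ofList [("a", ""), ("c", ""), ("g", ""), ("t", "")] : PySem.Dict String String)
      = PySem.Dict.mk [("a", String.ofList []), ("c", String.ofList []), ("g", String.ofList []), ("t", String.ofList [])]
    from by decide]
  rw [h]
  simp only [pv_pos_spec, pv_patch]
  rfl
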